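-- pv_equiv track=rewrite | github.com/prakash-kavi/viapssana_ts2 | plot_diagnostics.py | get_dwell_times
-- ===== SOURCE A (Python) =====
-- STATES = ["breath_control", "mind_wandering", "meta_awareness", "redirect_breath"]
--
-- def get_dwell_times(stats):
--     state_history = stats.get("state_history", [])
--     if not state_history: return {s: [] for s in STATES}
--
--     dwells = {s: [] for s in STATES}
--     if not state_history: return dwells
--
--     current_state = state_history[0]
--     count = 0
--     for s in state_history:
--         if s == current_state:
--             count += 1
--         else:
--             dwells[current_state].append(count)
--             current_state = s
--             count = 1
--     dwells[current_state].append(count)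
--     return dwells
-- ===== SOURCE B (Python) =====
-- STATES = ["breath_control", "mind_wandering", "meta_awareness", "redirect_breath"]
--
-- def get_dwell_times(stats):
--     h = stats.get("state_history", [])
--     dwells = {s: [] for s in STATES}
--     starts = [i for i in range(len(h)) if i == 0 or h[i] != h[i - 1]]
--     for start, end in zip(starts, starts[1:] + [len(h)]):
--         dwells[h[start]].append(end - start)
--     return dwells
-- ===== Notes on version B (the rewrite author's own statement) =====
-- stated objective: alternative
-- what changed: Replaces the current_state/count run-tracking loop (with its final flush) by a boundary-index formulation: one comprehension collects all run-start indices, then zip pairs each start with the next boundary and the dwell is their difference.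
import Mathlib
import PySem

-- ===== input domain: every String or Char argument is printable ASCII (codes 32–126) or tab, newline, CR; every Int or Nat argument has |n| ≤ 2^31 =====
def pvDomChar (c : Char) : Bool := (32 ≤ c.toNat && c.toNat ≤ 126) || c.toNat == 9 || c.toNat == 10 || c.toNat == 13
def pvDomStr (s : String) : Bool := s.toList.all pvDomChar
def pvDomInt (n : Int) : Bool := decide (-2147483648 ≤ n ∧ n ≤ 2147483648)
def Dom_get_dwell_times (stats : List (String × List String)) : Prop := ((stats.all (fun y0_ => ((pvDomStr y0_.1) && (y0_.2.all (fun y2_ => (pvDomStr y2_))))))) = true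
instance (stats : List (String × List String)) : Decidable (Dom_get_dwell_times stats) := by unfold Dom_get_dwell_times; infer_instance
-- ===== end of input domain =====

-- B replaces A's current_state/count run-tracking loop (with its final flush) by a
-- boundary-index formulation: collect all run-start indices, pair consecutive boundaries
-- with zip, dwell = difference; objective: alternative.


-- ===== PORT A =====
def pvSTATES : List String := ["breath_control", "mind_wandering", "meta_awareness", "redirect_breath"]

-- dwells[current_state].append(count): under Pre_ the key is present, so Dict.modify is exact
def get_dwell_times (stats : List (String × List String)) : List (String × List Int) :=
  let state_history := (PySem.Dict.mk stats).getD "state_history" []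
  if state_history = [] then
    (PySem.Dict.ofList (pvSTATES.map (fun s => (s, ([] : List Int))))).items
  else
    let dwells := PySem.Dict.ofList (pvSTATES.map (fun s => (s, ([] : List Int))))
    if state_history = [] then dwells.items
    else
      match state_history with
      | [] => dwells.items  -- unreachable: guarded by the `if` above
      | h :: _ =>
        -- current_state = state_history[0]; count = 0; then the for-loop, then the final append
        let fin := state_history.foldl
          (fun (acc : PySem.Dict String (List Int) × String × Int) s =>
            if s = acc.2.1 then (acc.1, acc.2.1, acc.2.2 + 1)
            else (acc.1.modify acc.2.1 [] (· ++ [acc.2.2]), s, (1 : Int)))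
          (dwells, h, (0 : Int))
        (fin.1.modify fin.2.1 [] (· ++ [fin.2.2])).items

-- ===== PORT B =====
-- starts = [i for i in range(len(h)) if i == 0 or h[i] != h[i-1]]: every index drawn from
-- range(len(h)) is in range and i-1 is only reached for i ≥ 1, so List.getD is exact here;
-- dwells[h[start]].append(end - start): under Pre_ the key is present, so Dict.modify is exact
def get_dwell_times_alt (stats : List (String × List String)) : List (String × List Int) :=
  let h := (PySem.Dict.mk stats).getD "state_history" []
  let dwells := PySem.Dict.ofList (pvSTATES.map (fun s => (s, ([] : List Int))))
  let starts := (List.range h.length).filter (fun i => i == 0 || !(h.getD i "" == h.getD (i - 1) ""))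
  ((starts.zip (starts.drop 1 ++ [h.length])).foldl
      (fun d p => d.modify (h.getD p.1 "") [] (· ++ [(p.2 : Int) - (p.1 : Int)])) dwells).items

-- ===== PRECONDITION & SPEC =====
-- Pre_ excludes histories containing a state outside STATES: there both Pythons raise KeyError
-- on dwells[...].append.
def Pre_get_dwell_times (stats : List (String × List String)) : Prop :=
  ∀ s ∈ (PySem.Dict.mk stats).getD "state_history" [], s ∈ pvSTATES
instance (stats : List (String × List String)) : Decidable (Pre_get_dwell_times stats) := by unfold Pre_get_dwell_times; infer_instance

def pvWitness_get_dwell_times : (List (String × List String)) :=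
  [("state_history", ["breath_control", "breath_control", "mind_wandering"])]

def Spec_get_dwell_times (stats : List (String × List String)) (out : List (String × List Int)) : Prop := out = get_dwell_times_alt stats
instance (stats : List (String × List String)) (out : List (String × List Int)) : Decidable (Spec_get_dwell_times stats out) := by unfold Spec_get_dwell_times; infer_instance

-- ===== CLAIM (what is proved, stated in full; the proofs are below) =====
def Claim_equal_get_dwell_times : Prop := ∀ (stats : List (String × List String)), Dom_get_dwell_times stats → Pre_get_dwell_times stats → Spec_get_dwell_times stats (get_dwell_times stats)

-- ===== LEMMAS AND PROOFS =====

-- The runs of a history, as (state, length) pairs: the common yardstick both ports reduce to.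
def pvRunsAux : String → Int → List String → List (String × Int)
  | cur, cnt, [] => [(cur, cnt)]
  | cur, cnt, s :: rest =>
      if s = cur then pvRunsAux cur (cnt + 1) rest
      else (cur, cnt) :: pvRunsAux s 1 rest

-- A's loop state (dict, current_state, count), finished by the final flush, equals folding
-- the per-run append over pvRunsAux of the remaining history.
theorem pv_loop_eq_runs (l : List String) :
    ∀ (d : PySem.Dict String (List Int)) (cur : String) (cnt : Int),
    (let fin := l.foldl
        (fun (acc : PySem.Dict String (List Int) × String × Int) s =>
          if s = acc.2.1 then (acc.1, acc.2.1, acc.2.2 + 1)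
          else (acc.1.modify acc.2.1 [] (· ++ [acc.2.2]), s, (1 : Int)))
        (d, cur, cnt);
      fin.1.modify fin.2.1 [] (· ++ [fin.2.2]))
    = (pvRunsAux cur cnt l).foldl (fun d p => d.modify p.1 [] (· ++ [p.2])) d := by
  induction l with
  | nil => intro d cur cnt; simp [pvRunsAux]
  | cons s rest ih =>
      intro d cur cnt
      by_cases h : s = cur
      · simpa [pvRunsAux, h] using ih d cur (cnt + 1)
      · simpa [pvRunsAux, h] using ih (d.modify cur [] (· ++ [cnt])) s 1

-- Generalized run-start indices of t, given that the element preceding t is prev.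
def pvS (prev : String) (t : List String) : List Nat :=
  (List.range t.length).filter
    (fun i => if i == 0 then !(t.getD 0 "" == prev) else !(t.getD i "" == t.getD (i - 1) ""))

def pvPairs (xs : List Nat) (n : Nat) : List (Nat × Nat) := xs.zip (xs.drop 1 ++ [n])

def pvM (prev : String) (t : List String) : List (String × Int) :=
  (pvPairs (pvS prev t) t.length).map (fun p => (t.getD p.1 "", (p.2 : Int) - (p.1 : Int)))


theorem pvS_cons (prev b : String) (t : List String) :
    pvS prev (b :: t) = (if b == prev then [] else [0]) ++ (pvS b t).map (· + 1) := by
  unfold pvS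
  rw [List.length_cons, List.range_succ_eq_map, List.filter_cons, List.filter_map]
  have hf : List.filter
      ((fun i => if (i == 0) = true then !(b :: t).getD 0 "" == prev
          else !(b :: t).getD i "" == (b :: t).getD (i - 1) "") ∘ Nat.succ)
      (List.range t.length)
    = List.filter (fun i => if (i == 0) = true then !t.getD 0 "" == b
          else !t.getD i "" == t.getD (i - 1) "") (List.range t.length) := by
    refine List.filter_congr ?_
    intro i _
    cases i with
    | zero => simp
    | succ j => simp
  rw [hf]
  by_cases hb : b = prev
  · simp [hb]
  · simp [hb]

theorem pv_shift (b : String) (t : List String) (xs : List Nat) (n : Nat) :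
    (pvPairs (xs.map (· + 1)) (n + 1)).map
        (fun p => ((b :: t).getD p.1 "", (p.2 : Int) - (p.1 : Int)))
      = (pvPairs xs n).map (fun p => (t.getD p.1 "", (p.2 : Int) - (p.1 : Int))) := by
  unfold pvPairs
  have h1 : (List.map (· + 1) xs).drop 1 ++ [n + 1] = List.map (· + 1) (xs.drop 1 ++ [n]) := by
    simp [← List.map_drop]
  rw [h1, List.zip_map, List.map_map]
  refine List.map_congr_left ?_
  intro p _
  simp [Prod.map]

theorem pv_zero_cons (b : String) (t : List String) (xs : List Nat) :
    (pvPairs (0 :: xs.map (· + 1)) (t.length + 1)).map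
        (fun p => ((b :: t).getD p.1 "", (p.2 : Int) - (p.1 : Int)))
      = (b, ((xs.headD t.length : Nat) : Int) + 1)
          :: (pvPairs xs t.length).map (fun p => (t.getD p.1 "", (p.2 : Int) - (p.1 : Int))) := by
  cases xs with
  | nil => simp [pvPairs]
  | cons x xs' =>
      have h2 := pv_shift b t (x :: xs') t.length
      unfold pvPairs at h2 ⊢
      simp only [List.map_cons, List.drop_succ_cons, List.drop_zero, List.zip_cons_cons,
        List.cons_append, List.headD_cons] at h2 ⊢
      rw [h2]
      push_cast
      simp

theorem pv_headD_map (xs : List Nat) (n : Nat) :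
    (((xs.map (· + 1)).headD (n + 1) : Nat) : Int) = ((xs.headD n : Nat) : Int) + 1 := by
  cases xs <;> simp

theorem pv_runsAux_eq (t : List String) : ∀ (cur : String) (cnt : Int),
    pvRunsAux cur cnt t = (cur, cnt + ((pvS cur t).headD t.length : Int)) :: pvM cur t := by
  induction t with
  | nil => intro cur cnt; simp [pvRunsAux, pvS, pvM, pvPairs]
  | cons b t ih =>
      intro cur cnt
      by_cases h : b = cur
      · subst h
        rw [show pvRunsAux b cnt (b :: t) = pvRunsAux b (cnt + 1) t from by simp [pvRunsAux]]
        rw [ih b (cnt + 1)]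
        have hS : pvS b (b :: t) = (pvS b t).map (· + 1) := by simp [pvS_cons]
        have hM : pvM b (b :: t) = pvM b t := by
          unfold pvM
          rw [hS, List.length_cons, pv_shift]
        rw [hM]
        simp only [List.length_cons, hS, pv_headD_map]
        congr 2
        ring
      · rw [show pvRunsAux cur cnt (b :: t) = (cur, cnt) :: pvRunsAux b 1 t from by
            simp [pvRunsAux, h]]
        rw [ih b 1]
        have hS : pvS cur (b :: t) = 0 :: (pvS b t).map (· + 1) := by
          simp [pvS_cons, h]
        have hM : pvM cur (b :: t)
            = (b, ((((pvS b t).headD t.length : Nat)) : Int) + 1) :: pvM b t := by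
          unfold pvM
          rw [hS, List.length_cons, pv_zero_cons]
        rw [hM]
        simp only [hS, List.headD_cons, Nat.cast_zero, add_zero]
        rw [add_comm (1 : Int)]

-- The port's starts list of a nonempty history, in terms of pvS.
theorem pv_starts_cons (a : String) (t : List String) :
    (List.range (a :: t).length).filter
        (fun i => i == 0 || !((a :: t).getD i "" == (a :: t).getD (i - 1) ""))
      = 0 :: (pvS a t).map (· + 1) := by
  rw [List.length_cons, List.range_succ_eq_map, List.filter_cons, List.filter_map]
  have hf : List.filter
      ((fun i => i == 0 || !((a :: t).getD i "" == (a :: t).getD (i - 1) "")) ∘ Nat.succ)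
      (List.range t.length)
    = List.filter (fun i => if (i == 0) = true then !t.getD 0 "" == a
          else !t.getD i "" == t.getD (i - 1) "") (List.range t.length) := by
    refine List.filter_congr ?_
    intro i _
    cases i with
    | zero => simp
    | succ j => simp
  rw [hf]
  simp [pvS]

-- ===== VERDICT (by name: the statement is the Claim_ definition above) =====
theorem get_dwell_times_spec : Claim_equal_get_dwell_times := by
  intro stats _ _
  unfold Spec_get_dwell_times get_dwell_times get_dwell_times_alt
  cases h : (PySem.Dict.mk stats).getD "state_history" [] with
  | nil => simp
  | cons a t =>
      simp only [if_neg (List.cons_ne_nil a t)]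
      -- A's side: loop + flush = fold over the runs
      have eA := pv_loop_eq_runs (a :: t)
          (PySem.Dict.ofList (pvSTATES.map (fun s => (s, ([] : List Int))))) a 0
      simp only [pvRunsAux, zero_add] at eA
      rw [eA]
      -- B's side: fold over boundary pairs = fold over the mapped pairs = fold over the runs
      have eMap : ∀ (l : List (Nat × Nat)) (d : PySem.Dict String (List Int)),
          l.foldl (fun d p => d.modify ((a :: t).getD p.1 "") []
              (· ++ [(p.2 : Int) - (p.1 : Int)])) d
          = (l.map (fun p => ((a :: t).getD p.1 "", (p.2 : Int) - (p.1 : Int)))).foldl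
              (fun d q => d.modify q.1 [] (· ++ [q.2])) d := by
        intro l d
        rw [List.foldl_map]
      rw [show ((List.range (a :: t).length).filter
            (fun i => i == 0 || !((a :: t).getD i "" == (a :: t).getD (i - 1) "")))
          = 0 :: (pvS a t).map (· + 1) from pv_starts_cons a t]
      rw [show (0 :: (pvS a t).map (· + 1)).zip
            (((0 :: (pvS a t).map (· + 1)).drop 1) ++ [(a :: t).length])
          = pvPairs (0 :: (pvS a t).map (· + 1)) (t.length + 1) from by
        simp [pvPairs]]
      rw [eMap, pv_zero_cons]
      rw [show ((pvPairs (pvS a t) t.length).map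
            (fun p => (t.getD p.1 "", (p.2 : Int) - (p.1 : Int)))) = pvM a t from rfl]
      rw [pv_runsAux_eq t a 1]
      rw [add_comm (1 : Int)]
      simp only [if_true]
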